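-- pv_equiv track=rewrite | github.com/alexoporanu/tema-sortari | Sortări.py | count_sort_2
-- ===== SOURCE A (Python) =====
-- def count_sort_2(L,exp):
--     freq=[]
--
--     for i in range(2):
--         freq.append([])
--
--     for number in L:
--         freq[(number>>exp)%2].append(number)
--
--     L=[]
--
--     for i in range(2):
--         L+=freq[i]
--
--     return L
-- ===== SOURCE B (Python) =====
-- def count_sort_2(L, exp):
--     return sorted(L, key=lambda n: (n >> exp) % 2)
-- ===== Notes on version B (the rewrite author's own statement) =====
-- stated objective: idiomatic
-- what changed: Replaces the hand-built bucket distribution (append into two freq lists, then concatenate) with Python's built-in stable sort keyed by the selected bit, sorted(L, key=lambda n: (n >> exp) % 2); stability of sorted makes it return the same stable partition.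
import Mathlib
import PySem

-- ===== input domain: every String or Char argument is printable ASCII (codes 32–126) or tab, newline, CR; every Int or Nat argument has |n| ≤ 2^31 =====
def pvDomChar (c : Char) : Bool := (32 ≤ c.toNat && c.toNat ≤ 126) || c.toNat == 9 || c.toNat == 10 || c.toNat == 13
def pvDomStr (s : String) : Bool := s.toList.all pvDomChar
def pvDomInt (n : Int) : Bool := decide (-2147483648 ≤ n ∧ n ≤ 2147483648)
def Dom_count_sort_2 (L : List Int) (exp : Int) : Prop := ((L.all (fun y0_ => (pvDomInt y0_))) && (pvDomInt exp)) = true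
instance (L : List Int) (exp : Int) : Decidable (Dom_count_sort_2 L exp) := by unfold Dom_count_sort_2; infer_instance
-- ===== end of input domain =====

-- B replaces A's hand-built bucket distribution with Python's built-in stable sort
-- keyed by the selected bit; objective: idiomatic. Equivalence proved for exp ≥ 0
-- (Python '>>' raises ValueError on a negative shift count).

-- Python 'n >> exp' for exp ≥ 0: arithmetic shift = floor division by 2^exp (exact there).
def pyShr (n : Int) (exp : Int) : Int := PySem.Int.floordiv n (2 ^ exp.toNat)

-- ===== PORT A =====
-- freq = [[], []]; for number in L: freq[(number>>exp)%2].append(number); L = freq[0] + freq[1]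
def count_sort_2 (L : List Int) (exp : Int) : List Int :=
  let freq := L.foldl (fun (f : List Int × List Int) number =>
    if PySem.Int.mod (pyShr number exp) 2 = 1 then (f.1, f.2 ++ [number])
    else (f.1 ++ [number], f.2)) ([], [])
  freq.1 ++ freq.2

-- ===== PORT B =====
-- return sorted(L, key=lambda n: (n >> exp) % 2)
def count_sort_2_alt (L : List Int) (exp : Int) : List Int :=
  PySem.List.sorted L (fun n => PySem.Int.mod (pyShr n exp) 2) false

-- ===== PRECONDITION & SPEC =====
-- Python '>>' raises ValueError for a negative shift count, in both A and B;
-- with an empty L the shift is never evaluated, so only nonempty lists need 0 ≤ exp.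
def Pre_count_sort_2 (L : List Int) (exp : Int) : Prop := L = [] ∨ 0 ≤ exp
instance (L : List Int) (exp : Int) : Decidable (Pre_count_sort_2 L exp) := by unfold Pre_count_sort_2; infer_instance
def pvWitness_count_sort_2 : List Int × Int := ([3, 1, 2, 2, -5], 1)

def Spec_count_sort_2 (L : List Int) (exp : Int) (out : List Int) : Prop := out = count_sort_2_alt L exp
instance (L : List Int) (exp : Int) (out : List Int) : Decidable (Spec_count_sort_2 L exp out) := by unfold Spec_count_sort_2; infer_instance

-- ===== CLAIM =====
def Claim_equal_count_sort_2 : Prop := ∀ (L : List Int) (exp : Int), Dom_count_sort_2 L exp → Pre_count_sort_2 L exp → Spec_count_sort_2 L exp (count_sort_2 L exp)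

-- ===== LEMMAS AND PROOFS =====

-- For the positive divisor 2, Python's mod is Lean's emod.
lemma mod2 (m : Int) : PySem.Int.mod m 2 = m % 2 :=
  PySem.Int.mod_eq_emod_of_pos (by norm_num)

-- The bit key takes only the values 0 and 1.
lemma key_cases (n exp : Int) : pyShr n exp % 2 = 0 ∨ pyShr n exp % 2 = 1 := by omega

-- A's distributing pass characterised as the pair of filters.
lemma count_sort_2_fold (L : List Int) (exp : Int) (f0 f1 : List Int) :
    L.foldl (fun (f : List Int × List Int) number =>
      if pyShr number exp % 2 = 1 then (f.1, f.2 ++ [number])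
      else (f.1 ++ [number], f.2)) (f0, f1)
    = (f0 ++ L.filter (fun n => pyShr n exp % 2 == 0),
       f1 ++ L.filter (fun n => pyShr n exp % 2 == 1)) := by
  induction L generalizing f0 f1 with
  | nil => simp
  | cons x xs ih =>
    simp only [List.foldl_cons, List.filter_cons]
    rcases key_cases x exp with h | h
    · have hd : 2 ∣ pyShr x exp := Int.dvd_of_emod_eq_zero h
      rw [if_neg (by omega), ih]
      simp [h]
    · have hnd : ¬ (2 ∣ pyShr x exp) := by omega
      rw [if_pos h, ih]
      simp [h]

-- Inserting into a 0-bucket ++ 1-bucket keeps that shape (stability of insertBy).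
lemma insertBy_partition (exp : Int) (x : Int) (zs os : List Int)
    (hz : ∀ z ∈ zs, pyShr z exp % 2 = 0)
    (ho : ∀ o ∈ os, pyShr o exp % 2 = 1) :
    PySem.List.insertBy (fun a b => decide (pyShr a exp % 2 < pyShr b exp % 2)) x (zs ++ os)
    = if pyShr x exp % 2 = 1 then zs ++ os ++ [x] else zs ++ x :: os := by
  induction zs with
  | nil =>
    simp only [List.nil_append]
    induction os with
    | nil =>
      simp only [PySem.List.insertBy]
      split_ifs <;> rfl
    | cons o ot iho =>
      have hko : pyShr o exp % 2 = 1 := ho o (by simp)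
      have iho' := iho (fun o' ho' => ho o' (List.mem_cons_of_mem _ ho'))
      rcases key_cases x exp with h | h
      · simp [PySem.List.insertBy, h, hko]
      · simp [PySem.List.insertBy, h, hko, iho']
  | cons z zt ih =>
    have hkz : pyShr z exp % 2 = 0 := hz z (by simp)
    have hnb : ¬ (pyShr x exp % 2 < pyShr z exp % 2) := by
      have := key_cases x exp; omega
    have ih' := ih (fun z' hz' => hz z' (List.mem_cons_of_mem _ hz'))
    rcases key_cases x exp with h | h <;>
      · simp only [List.cons_append, PySem.List.insertBy, decide_eq_true_eq,
          if_neg hnb, ih']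
        simp [h]

-- The stable insertion-sort fold over L, started from a partitioned accumulator,
-- extends the two buckets by L's two filters.
lemma sort_fold_partition (exp : Int) (L : List Int) (zs os : List Int)
    (hz : ∀ z ∈ zs, pyShr z exp % 2 = 0)
    (ho : ∀ o ∈ os, pyShr o exp % 2 = 1) :
    L.foldl (fun acc x => PySem.List.insertBy
        (fun a b => decide (pyShr a exp % 2 < pyShr b exp % 2)) x acc) (zs ++ os)
    = (zs ++ L.filter (fun n => pyShr n exp % 2 == 0))
      ++ (os ++ L.filter (fun n => pyShr n exp % 2 == 1)) := by
  induction L generalizing zs os with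
  | nil => simp
  | cons x xs ih =>
    simp only [List.foldl_cons, List.filter_cons]
    rw [insertBy_partition exp x zs os hz ho]
    rcases key_cases x exp with h | h
    · have hd : 2 ∣ pyShr x exp := Int.dvd_of_emod_eq_zero h
      rw [if_neg (by omega)]
      have hsplit : zs ++ x :: os = (zs ++ [x]) ++ os := by simp
      rw [hsplit, ih (zs ++ [x]) os
        (by intro z hzm; rcases List.mem_append.1 hzm with hm | hm
            · exact hz z hm
            · simp at hm; subst hm; exact h) ho]
      simp [h]
    · have hnd : ¬ (2 ∣ pyShr x exp) := by omega
      rw [if_pos h]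
      have hsplit : zs ++ os ++ [x] = zs ++ (os ++ [x]) := by simp
      rw [hsplit, ih zs (os ++ [x]) hz
        (by intro o hom; rcases List.mem_append.1 hom with hm | hm
            · exact ho o hm
            · simp at hm; subst hm; exact h)]
      simp [h]

-- ===== VERDICT =====
theorem count_sort_2_spec : Claim_equal_count_sort_2 := by
  intro L exp _ _
  unfold Spec_count_sort_2 count_sort_2 count_sort_2_alt
  simp only [mod2, PySem.List.sorted_eq_foldl_insertBy]
  rw [count_sort_2_fold]
  have h := sort_fold_partition exp L [] []
    (by intro z hz; simp at hz) (by intro o ho; simp at ho)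
  simp only [List.nil_append] at h
  rw [h]
  simp
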